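-- pv_equiv track=rewrite | github.com/koskin17/MyEducation | Different/CodeWars/лягушка прыгает по массиву.py | solution
-- ===== SOURCE A (Python) =====
-- def solution(a):
--     steps = 0
--     index = 0
--     length = len(a)
--     indexes = set()
--     while 0 <= index < length:
--         if index in indexes:
--             return -1
--         indexes.add(index)
--         index += a[index]
--         steps += 1
--     return steps
-- ===== SOURCE B (Python) =====
-- def solution(a):
--     index = 0
--     length = len(a)
--     for steps in range(length + 1):
--         if not (0 <= index < length):
--             return steps
--         index += a[index]
--     return -1
-- ===== Notes on version B (the rewrite author's own statement) =====
-- stated objective: simpler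
-- what changed: Replaces the visited-set cycle detection with a bounded for-loop: at most len(a)+1 jumps are attempted and -1 is returned only when that budget is exhausted, which by pigeonhole happens exactly when the frog cycles.
import Mathlib
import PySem

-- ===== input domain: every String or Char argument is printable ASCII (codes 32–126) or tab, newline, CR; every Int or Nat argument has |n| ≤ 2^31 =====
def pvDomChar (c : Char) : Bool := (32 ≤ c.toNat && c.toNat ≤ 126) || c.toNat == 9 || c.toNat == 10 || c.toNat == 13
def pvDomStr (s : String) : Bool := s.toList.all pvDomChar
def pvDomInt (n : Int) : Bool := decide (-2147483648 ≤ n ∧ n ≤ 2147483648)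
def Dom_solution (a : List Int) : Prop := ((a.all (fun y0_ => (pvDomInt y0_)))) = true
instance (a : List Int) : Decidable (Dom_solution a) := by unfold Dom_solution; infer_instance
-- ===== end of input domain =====

-- B replaces A's visited-set cycle detection by a bounded for-loop of at most len(a)+1 jumps,
-- returning -1 only when that budget is exhausted; same return value, no set kept.

-- one frog jump: index + a[index]; both Pythons read a[index] only under the
-- guard 0 ≤ index < len(a), where pyGetD is exact
def pvStep (a : List Int) (i : Int) : Int := i + PySem.List.pyGetD a i 0

-- ===== PORT A =====
-- A's while loop as fuel recursion; fuel a.length + 1 is never exhausted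
-- (each iteration either returns or adds a fresh in-range index to the set)
def solutionLoopA (a : List Int) : Nat → Int → Int → PySem.Set Int → Int
  | 0, _, _, _ => -1
  | fuel + 1, index, steps, indexes =>
    if 0 ≤ index ∧ index < (a.length : Int) then
      if PySem.Set.contains indexes index then -1
      else solutionLoopA a fuel (pvStep a index) (steps + 1) (PySem.Set.add indexes index)
    else steps

def solution (a : List Int) : Int :=
  solutionLoopA a (a.length + 1) 0 0 PySem.Set.empty

-- ===== PORT B =====
-- B's for-loop over range(length + 1): `rem` counts the remaining loop
-- iterations, `steps` is the range variable; exhausting the range yields -1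
def solutionLoopB (a : List Int) : Nat → Int → Int → Int
  | 0, _, _ => -1
  | rem + 1, steps, index =>
    if ¬ (0 ≤ index ∧ index < (a.length : Int)) then steps
    else solutionLoopB a rem (steps + 1) (index + PySem.List.pyGetD a index 0)

def solution_alt (a : List Int) : Int :=
  solutionLoopB a (a.length + 1) 0 0

-- ===== PRECONDITION & SPEC =====
def Spec_solution (a : List Int) (out : Int) : Prop := out = solution_alt a
instance (a : List Int) (out : Int) : Decidable (Spec_solution a out) := by unfold Spec_solution; infer_instance

-- ===== CLAIM (what is proved, stated in full; the proofs are below) =====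
def Claim_equal_solution : Prop := ∀ (a : List Int), Dom_solution a → Spec_solution a (solution a)

-- ===== LEMMAS AND PROOFS =====

-- iterating pvStep along a recorded chain of jumps
theorem pv_chain_iter (a : List Int) (vis : List Int) (i : Int)
    (hch : ∀ t, t < vis.length →
      pvStep a ((vis ++ [i]).getD t 0) = (vis ++ [i]).getD (t + 1) 0) :
    ∀ m j, j + m ≤ vis.length →
      (pvStep a)^[m] ((vis ++ [i]).getD j 0) = (vis ++ [i]).getD (j + m) 0 := by
  intro m
  induction m with
  | zero => intro j _; simp
  | succ m ih =>
    intro j hjm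
    rw [Function.iterate_succ_apply', ih j (by omega), hch (j + m) (by omega)]
    have : j + m + 1 = j + (m + 1) := by omega
    rw [this]

-- a periodic orbit that stays in bounds over one period stays in bounds forever
theorem pv_periodic_inbounds (a : List Int) (i : Int) (p : Nat) (hp : 0 < p)
    (hper : (pvStep a)^[p] i = i)
    (hin : ∀ m, m < p → 0 ≤ (pvStep a)^[m] i ∧ (pvStep a)^[m] i < (a.length : Int)) :
    ∀ n, 0 ≤ (pvStep a)^[n] i ∧ (pvStep a)^[n] i < (a.length : Int) := by
  have hmul : ∀ q, (pvStep a)^[p * q] i = i := by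
    intro q
    induction q with
    | zero => simp
    | succ q ih => rw [Nat.mul_succ, Function.iterate_add_apply, hper, ih]
  intro n
  have hdecomp : (pvStep a)^[n] i = (pvStep a)^[n % p] i := by
    conv_lhs => rw [← Nat.mod_add_div n p, Function.iterate_add_apply, hmul]
  rw [hdecomp]
  exact hin _ (Nat.mod_lt _ hp)

-- if the orbit of i never leaves bounds, B's loop exhausts its budget and returns -1
theorem pv_loopB_cycle (a : List Int) :
    ∀ rem steps i, (∀ n, 0 ≤ (pvStep a)^[n] i ∧ (pvStep a)^[n] i < (a.length : Int)) →
      solutionLoopB a rem steps i = -1 := by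
  intro rem
  induction rem with
  | zero => intro steps i _; rfl
  | succ rem ih =>
    intro steps i hin
    have h0 := hin 0
    simp only [Function.iterate_zero, id] at h0
    simp only [solutionLoopB, if_neg (not_not_intro h0)]
    exact ih (steps + 1) (pvStep a i) (fun n => by
      have := hin (n + 1)
      rwa [Function.iterate_succ_apply] at this)

-- main invariant: vis is the (in-bounds) chain of indices visited so far, the
-- current index is i, steps = |vis|, and A's set is exactly set(vis)
theorem pv_main (a : List Int) :
    ∀ fuel i (vis : List Int),
      (∀ v ∈ vis, 0 ≤ v ∧ v < (a.length : Int)) →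
      (∀ t, t < vis.length →
        pvStep a ((vis ++ [i]).getD t 0) = (vis ++ [i]).getD (t + 1) 0) →
      solutionLoopA a fuel i (vis.length : Int) (PySem.Set.ofList vis) =
        solutionLoopB a fuel (vis.length : Int) i := by
  intro fuel
  induction fuel with
  | zero => intro i vis _ _; rfl
  | succ fuel ih =>
    intro i vis hbnd hch
    by_cases hin : 0 ≤ i ∧ i < (a.length : Int)
    · simp only [solutionLoopA, solutionLoopB, if_pos hin, if_neg (not_not_intro hin)]
      by_cases hmem : i ∈ vis
      · -- A returns -1; B cycles forever in bounds, hence exhausts its budget: -1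
        rw [if_pos ((PySem.Set.contains_iff _ _).mpr ((PySem.Set.mem_ofList _ _).mpr hmem))]
        obtain ⟨j, hj, hgetj⟩ := List.getElem_of_mem hmem
        have hgj : (vis ++ [i]).getD j 0 = i := by
          rw [List.getD_append _ _ _ _ (by omega)]
          rw [List.getD_eq_getElem _ _ hj, hgetj]
        have hgk : (vis ++ [i]).getD vis.length 0 = i := by
          simp [List.getD_eq_getElem?_getD]
        have hper : (pvStep a)^[vis.length - j] i = i := by
          have := pv_chain_iter a vis i hch (vis.length - j) j (by omega)
          rwa [hgj, Nat.add_sub_cancel' (le_of_lt hj), hgk] at this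
        have horb : ∀ n, 0 ≤ (pvStep a)^[n] i ∧ (pvStep a)^[n] i < (a.length : Int) := by
          refine pv_periodic_inbounds a i (vis.length - j) (by omega) hper ?_
          intro m hm
          have := pv_chain_iter a vis i hch m j (by omega)
          rw [hgj] at this
          rw [this]
          have hjm : j + m < vis.length := by omega
          rw [List.getD_append _ _ _ _ hjm, List.getD_eq_getElem _ _ hjm]
          exact hbnd _ (List.getElem_mem _)
        exact (pv_loopB_cycle a fuel ((vis.length : Int) + 1) (pvStep a i) (fun n => by
          have := horb (n + 1)
          rwa [Function.iterate_succ_apply] at this)).symm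
      · -- fresh index: both loops take one jump in lockstep
        rw [if_neg (by
          intro hc
          exact hmem ((PySem.Set.mem_ofList _ _).mp ((PySem.Set.contains_iff _ _).mp hc)))]
        have hbnd' : ∀ v ∈ vis ++ [i], 0 ≤ v ∧ v < (a.length : Int) := by
          intro v hv
          rcases List.mem_append.mp hv with h | h
          · exact hbnd v h
          · simp at h; subst h; exact hin
        have hset : PySem.Set.add (PySem.Set.ofList vis) i = PySem.Set.ofList (vis ++ [i]) := by
          simp [PySem.Set.ofList_eq_foldl, List.foldl_append]
        have hch' : ∀ t, t < (vis ++ [i]).length →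
            pvStep a ((vis ++ [i] ++ [pvStep a i]).getD t 0) =
              (vis ++ [i] ++ [pvStep a i]).getD (t + 1) 0 := by
          intro t ht
          simp only [List.length_append, List.length_singleton] at ht
          rcases Nat.lt_or_ge t vis.length with h | h
          · have eA : (vis ++ [i] ++ [pvStep a i]).getD t 0 = (vis ++ [i]).getD t 0 :=
              List.getD_append _ _ _ _ (by simp; omega)
            have eB : (vis ++ [i] ++ [pvStep a i]).getD (t + 1) 0 = (vis ++ [i]).getD (t + 1) 0 :=
              List.getD_append _ _ _ _ (by simp; omega)
            rw [eA, eB]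
            exact hch t h
          · have : t = vis.length := by omega
            subst this
            rw [List.getD_append _ _ _ _ (by simp)]
            have h1 : (vis ++ [i]).getD vis.length 0 = i := by
              simp [List.getD_eq_getElem?_getD]
            have h2 : (vis ++ [i] ++ [pvStep a i]).getD (vis.length + 1) 0 = pvStep a i := by
              have : (vis ++ [i]).length = vis.length + 1 := by simp
              rw [← this, List.getD_eq_getElem?_getD]
              simp
            rw [h1, h2]
        have := ih (pvStep a i) (vis ++ [i]) hbnd' hch'
        rw [hset]
        simpa [pvStep] using this
    · simp only [solutionLoopA, solutionLoopB, if_neg hin, if_pos hin]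

-- ===== VERDICT (by name: the statement is the Claim_ definition above) =====
theorem solution_spec : Claim_equal_solution := by
  intro a _
  unfold Spec_solution solution solution_alt
  have h := pv_main a (a.length + 1) 0 [] (by simp) (by simp)
  simpa [PySem.Set.empty] using h
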